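-- pv_equiv track=rewrite | github.com/onticabo/learning | B079相性チェック_大塚.py | to_chemistry_index
-- ===== SOURCE A (Python) =====
-- def to_chemistry_index(source):
--     while 1 < len(source):
--         result = []
--         for i in range(0, len(source) - 1):
--             value = (source[i] + source[i+1]) % 101
--             result.append(value)
--         source = result
--     return source[0]
-- ===== SOURCE B (Python) =====
-- _MOD = 101
--
--
-- def _small_comb(n, k):
--     """C(n, k) exactly, for 0 <= k (returns 0 when k > n)."""
--     if k > n:
--         return 0
--     c = 1
--     for i in range(k):
--         c = c * (n - i) // (i + 1)
--     return c
--
--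
-- def _comb_mod(n, k):
--     """C(n, k) % 101 via Lucas' theorem (101 is prime)."""
--     r = 1
--     while k > 0:
--         r = r * _small_comb(n % _MOD, k % _MOD) % _MOD
--         n //= _MOD
--         k //= _MOD
--     return r
--
--
-- def to_chemistry_index(source):
--     # Repeated adjacent-sum reduction mod 101 equals the binomially
--     # weighted sum: result = sum(C(n-1, k) * source[k]) % 101 for n >= 2.
--     n = len(source)
--     if n == 1:
--         return source[0]
--     total = 0
--     for k, x in enumerate(source):
--         total += _comb_mod(n - 1, k) * x
--     return total % _MOD
-- ===== Notes on version B (the rewrite author's own statement) =====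
-- stated objective: faster
-- what changed: A repeatedly collapses the list by adjacent sums mod 101 (n-1 quadratic passes); B evaluates the closed form sum(C(n-1,k)*source[k]) % 101 in one pass, computing each binomial coefficient mod the prime 101 via Lucas' theorem with an exact small-binomial helper.
-- outside the precondition, e.g. on to_chemistry_index([]): A raises IndexError, B returns 0
import Mathlib
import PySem

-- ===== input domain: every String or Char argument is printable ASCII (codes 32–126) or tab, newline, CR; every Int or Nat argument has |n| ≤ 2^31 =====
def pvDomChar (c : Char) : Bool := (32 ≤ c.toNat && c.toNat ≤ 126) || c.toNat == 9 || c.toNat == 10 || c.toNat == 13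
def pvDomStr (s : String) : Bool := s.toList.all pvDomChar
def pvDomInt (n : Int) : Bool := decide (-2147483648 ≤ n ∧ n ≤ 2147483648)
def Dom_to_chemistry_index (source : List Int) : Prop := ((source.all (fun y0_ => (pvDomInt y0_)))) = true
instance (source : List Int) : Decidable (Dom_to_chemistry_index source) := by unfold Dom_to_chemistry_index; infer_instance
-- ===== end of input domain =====

-- B replaces A's O(n^2) repeated adjacent-sum reduction by the closed-form binomially
-- weighted sum sum(C(n-1,k)*source[k]) % 101 with C(n-1,k) mod 101 computed via Lucas'
-- theorem (101 is prime); measured faster on large inputs.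

-- ===== PORT A =====
-- one reduction pass: result = [(source[i]+source[i+1]) % 101 for i in range(0, len-1)]
-- (indices produced by the range are always in bounds, so pyGetD's default is unreachable)
def pvStepA (s : List Int) : List Int :=
  (PySem.List.pyRange 0 ((s.length : Int) - 1) 1).foldl
    (fun r i => r ++ [PySem.Int.mod (PySem.List.pyGetD s i 0 + PySem.List.pyGetD s (i + 1) 0) 101]) []

theorem pvStepA_eq (s : List Int) :
    pvStepA s = (List.range (s.length - 1)).map
      (fun k => PySem.Int.mod (s.getD k 0 + s.getD (k + 1) 0) 101) := by
  unfold pvStepA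
  rw [PySem.List.foldl_append_singleton_eq_map, PySem.List.pyRange_one, List.map_map]
  have h1 : (((s.length : Int) - 1) - 0).toNat = s.length - 1 := by omega
  rw [h1]
  refine List.map_congr_left ?_
  intro k hk
  simp only [Function.comp, zero_add]
  have h3 : ((k : Int) + 1) = ((k + 1 : Nat) : Int) := by push_cast; ring
  rw [h3, PySem.List.pyGetD_natCast, PySem.List.pyGetD_natCast]

theorem pvStepA_length (s : List Int) : (pvStepA s).length = s.length - 1 := by
  rw [pvStepA_eq]; simp

-- while 1 < len(source): source = <one reduction pass> ; return source[0]
-- (source[0] on the empty list is an IndexError — excluded by Pre_)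
def to_chemistry_index (source : List Int) : Int :=
  if 1 < source.length then to_chemistry_index (pvStepA source)
  else PySem.List.pyGetD source 0 0
termination_by source.length
decreasing_by
  have := pvStepA_length source
  omega

-- ===== PORT B =====
-- C(n, k) exactly, for 0 <= k (0 when k > n), by the multiplicative formula
def pvSmallComb (n k : Int) : Int :=
  if k > n then 0
  else (PySem.List.pyRange 0 k 1).foldl
    (fun c i => PySem.Int.floordiv (c * (n - i)) (i + 1)) 1

-- while k > 0: r = r * _small_comb(n % 101, k % 101) % 101; n //= 101; k //= 101
def pvCombModLoop (n k r : Int) : Int :=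
  if 0 < k then
    pvCombModLoop (PySem.Int.floordiv n 101) (PySem.Int.floordiv k 101)
      (PySem.Int.mod (r * pvSmallComb (PySem.Int.mod n 101) (PySem.Int.mod k 101)) 101)
  else r
termination_by k.toNat
decreasing_by
  rename_i hk
  simp only [PySem.Int.floordiv_eq_ediv_of_pos (by omega : (0:Int) < 101)]
  omega

def pvCombMod (n k : Int) : Int := pvCombModLoop n k 1

def to_chemistry_index_alt (source : List Int) : Int :=
  let n : Int := source.length
  if n = 1 then PySem.List.pyGetD source 0 0
  else
    PySem.Int.mod
      ((PySem.List.enumerate source).foldl (fun t p => t + pvCombMod (n - 1) p.1 * p.2) 0) 101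

-- ===== PRECONDITION & SPEC =====
-- Pre_ excludes only the empty list, on which A raises IndexError (source[0]).
def Pre_to_chemistry_index (source : List Int) : Prop := source ≠ []
instance (source : List Int) : Decidable (Pre_to_chemistry_index source) := by
  unfold Pre_to_chemistry_index; infer_instance

def pvWitness_to_chemistry_index : List Int := [7, -3, 55]

def Spec_to_chemistry_index (source : List Int) (out : Int) : Prop := out = to_chemistry_index_alt source
instance (source : List Int) (out : Int) : Decidable (Spec_to_chemistry_index source out) := by
  unfold Spec_to_chemistry_index; infer_instance

-- ===== CLAIM (what is proved, stated in full; the proofs are below) =====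
def Claim_equal_to_chemistry_index : Prop := ∀ (source : List Int), Dom_to_chemistry_index source → Pre_to_chemistry_index source → Spec_to_chemistry_index source (to_chemistry_index source)

-- ===== LEMMAS AND PROOFS =====

-- the binomially weighted sum of a list, in ZMod 101
def pvW (s : List Int) : ZMod 101 :=
  ∑ k ∈ Finset.range s.length, (Nat.choose (s.length - 1) k : ZMod 101) * ((s.getD k 0 : Int) : ZMod 101)

theorem pv_cast_mod (a : Int) : ((PySem.Int.mod a 101 : Int) : ZMod 101) = (a : ZMod 101) := by
  rw [PySem.Int.mod_eq_emod_of_pos (by omega)]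
  exact_mod_cast ZMod.intCast_mod a 101

-- an integer in [0, 101) casting to z equals z.val
theorem pv_val_eq {v : Int} {z : ZMod 101} (h0 : 0 ≤ v) (h1 : v < 101)
    (hc : ((v : Int) : ZMod 101) = z) : v = (z.val : Int) := by
  have := ZMod.val_intCast (n := 101) v
  rw [hc] at this
  omega

theorem pvW_step (s : List Int) (h : 2 ≤ s.length) : pvW (pvStepA s) = pvW s := by
  obtain ⟨m, hm⟩ : ∃ m, s.length = m + 2 := ⟨s.length - 2, by omega⟩
  have hget : ∀ k, k < m + 1 →
      ((pvStepA s).getD k 0 : Int) = PySem.Int.mod (s.getD k 0 + s.getD (k + 1) 0) 101 := by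
    intro k hk
    rw [pvStepA_eq, hm, show m + 2 - 1 = m + 1 from by omega]
    rw [List.getD_eq_getElem?_getD, List.getElem?_map, List.getElem?_range (by omega)]
    simp
  have hlen : (pvStepA s).length = m + 1 := by rw [pvStepA_length]; omega
  unfold pvW
  rw [hlen, hm, show m + 1 - 1 = m from by omega, show m + 2 - 1 = m + 1 from by omega]
  have hL : ∑ k ∈ Finset.range (m + 1), (Nat.choose m k : ZMod 101) * (((pvStepA s).getD k 0 : Int) : ZMod 101)
      = ∑ k ∈ Finset.range (m + 1), (Nat.choose m k : ZMod 101) *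
          (((s.getD k 0 : Int) : ZMod 101) + ((s.getD (k + 1) 0 : Int) : ZMod 101)) := by
    refine Finset.sum_congr rfl ?_
    intro k hk
    rw [Finset.mem_range] at hk
    rw [hget k hk, pv_cast_mod]
    push_cast
    rfl
  rw [hL]
  have hR : ∑ k ∈ Finset.range (m + 2), (Nat.choose (m + 1) k : ZMod 101) * ((s.getD k 0 : Int) : ZMod 101)
      = ∑ k ∈ Finset.range (m + 1), (Nat.choose m k : ZMod 101) * ((s.getD (k + 1) 0 : Int) : ZMod 101)
        + ∑ k ∈ Finset.range (m + 2), (Nat.choose m k : ZMod 101) * ((s.getD k 0 : Int) : ZMod 101) := by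
    rw [Finset.sum_range_succ' (fun k => (Nat.choose (m + 1) k : ZMod 101) * ((s.getD k 0 : Int) : ZMod 101))]
    simp only [Nat.choose_succ_succ, Nat.cast_add, add_mul, Nat.choose_zero_right, Nat.cast_one]
    rw [Finset.sum_add_distrib]
    rw [Finset.sum_range_succ' (fun k => (Nat.choose m k : ZMod 101) * ((s.getD k 0 : Int) : ZMod 101))]
    simp only [Nat.choose_zero_right, Nat.cast_one]
    ring
  rw [hR]
  have hz : ∑ k ∈ Finset.range (m + 2), (Nat.choose m k : ZMod 101) * ((s.getD k 0 : Int) : ZMod 101)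
      = ∑ k ∈ Finset.range (m + 1), (Nat.choose m k : ZMod 101) * ((s.getD k 0 : Int) : ZMod 101) := by
    rw [Finset.sum_range_succ, Nat.choose_eq_zero_of_lt (by omega)]
    simp
  rw [hz]
  simp only [mul_add]
  rw [Finset.sum_add_distrib]
  ring

-- A computes the canonical representative of the weighted sum, for lists of length ≥ 2
theorem pvA_correct (s : List Int) (h : 2 ≤ s.length) :
    to_chemistry_index s = ((pvW s).val : Int) := by
  induction hn : s.length using Nat.strong_induction_on generalizing s with
  | _ n ih =>
  subst hn
  rw [to_chemistry_index]
  rw [if_pos (by omega)]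
  by_cases h2 : 2 ≤ (pvStepA s).length
  · rw [ih (pvStepA s).length (by rw [pvStepA_length]; omega) (pvStepA s) h2 rfl,
      pvW_step s h]
  · -- s.length = 2 : one step leaves a single reduced element
    have hl2 : s.length = 2 := by have := pvStepA_length s; omega
    have hl1 : (pvStepA s).length = 1 := by rw [pvStepA_length, hl2]
    rw [to_chemistry_index, if_neg (by omega)]
    have hv := pvStepA_eq s
    rw [hl2] at hv
    rw [show (2:Nat) - 1 = 1 from rfl, List.range_one] at hv
    simp only [List.map_cons, List.map_nil] at hv
    have hget0 : PySem.List.pyGetD (pvStepA s) 0 0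
        = PySem.Int.mod (s.getD 0 0 + s.getD 1 0) 101 := by
      rw [hv]; simp [PySem.List.pyGetD_zero]
    rw [hget0]
    have hWs : pvW s = ((s.getD 0 0 + s.getD 1 0 : Int) : ZMod 101) := by
      unfold pvW
      rw [hl2]
      simp [Finset.sum_range_succ]
    refine pv_val_eq (PySem.Int.mod_nonneg _ (by omega)) (PySem.Int.mod_lt _ (by omega)) ?_
    rw [pv_cast_mod, hWs]

-- pvSmallComb is the binomial coefficient
theorem pvSmallComb_eq (n k : Int) (hn : 0 ≤ n) (hk : 0 ≤ k) :
    pvSmallComb n k = (Nat.choose n.toNat k.toNat : Int) := by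
  unfold pvSmallComb
  by_cases hkn : k > n
  · rw [if_pos hkn, Nat.choose_eq_zero_of_lt (by omega)]; simp
  · rw [if_neg hkn]
    rw [PySem.List.pyRange_one]
    simp only [zero_add, show (k - 0 : Int) = k from by ring]
    rw [List.foldl_map]
    suffices H : ∀ j : Nat, j ≤ k.toNat →
        (List.range j).foldl (fun (c : Int) (i : Nat) => PySem.Int.floordiv (c * (n - (i : Int))) ((i : Int) + 1)) 1
          = (Nat.choose n.toNat j : Int) from H k.toNat le_rfl
    intro j hj
    induction j with
    | zero => simp
    | succ i ihi =>
      rw [List.range_succ, List.foldl_append, ihi (by omega)]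
      simp only [List.foldl]
      have h3 : i ≤ n.toNat := by omega
      have hstep : (Nat.choose n.toNat i : Int) * (n - (i : Int))
          = (Nat.choose n.toNat (i + 1) : Int) * ((i : Int) + 1) := by
        have hc := Nat.choose_succ_right_eq n.toNat i
        zify [h3] at hc
        rw [Int.toNat_of_nonneg hn] at hc
        linarith
      rw [PySem.Int.floordiv_eq_ediv_of_pos (by omega), hstep,
        Int.mul_ediv_cancel _ (by omega)]

-- one Lucas step, in ZMod 101
theorem pv_lucas_step (a b : Nat) :
    (Nat.choose a b : ZMod 101) = (Nat.choose (a % 101) (b % 101) : ZMod 101) * (Nat.choose (a / 101) (b / 101) : ZMod 101) := by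
  haveI : Fact (Nat.Prime 101) := ⟨by norm_num⟩
  have := Choose.choose_modEq_choose_mod_mul_choose_div_nat (n := a) (k := b) (p := 101)
  rw [← ZMod.natCast_eq_natCast_iff] at this
  rw [this]
  push_cast
  ring

theorem pvCombModLoop_cast (k : Nat) : ∀ n r : Int, 0 ≤ n → ∀ kk : Int, 0 ≤ kk → kk.toNat = k →
    ((pvCombModLoop n kk r : Int) : ZMod 101) = (r : ZMod 101) * (Nat.choose n.toNat kk.toNat : ZMod 101) := by
  induction k using Nat.strong_induction_on with
  | _ k ih =>
  intro n r hn kk hkk hkkt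
  rw [pvCombModLoop]
  by_cases h0 : 0 < kk
  · rw [if_pos h0]
    have h101 : (0:Int) < 101 := by omega
    have hdivn : 0 ≤ PySem.Int.floordiv n 101 := by
      rw [PySem.Int.floordiv_eq_ediv_of_pos h101]; omega
    have hdivk : 0 ≤ PySem.Int.floordiv kk 101 := by
      rw [PySem.Int.floordiv_eq_ediv_of_pos h101]; omega
    have hlt : (PySem.Int.floordiv kk 101).toNat < k := by
      rw [PySem.Int.floordiv_eq_ediv_of_pos h101]; omega
    rw [ih _ hlt _ _ hdivn _ hdivk rfl]
    rw [pv_cast_mod]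
    push_cast
    have hmn : (PySem.Int.mod n 101).toNat = n.toNat % 101 := by
      rw [PySem.Int.mod_eq_emod_of_pos h101]; omega
    have hmk : (PySem.Int.mod kk 101).toNat = kk.toNat % 101 := by
      rw [PySem.Int.mod_eq_emod_of_pos h101]; omega
    have hdn : (PySem.Int.floordiv n 101).toNat = n.toNat / 101 := by
      rw [PySem.Int.floordiv_eq_ediv_of_pos h101]; omega
    have hdk : (PySem.Int.floordiv kk 101).toNat = kk.toNat / 101 := by
      rw [PySem.Int.floordiv_eq_ediv_of_pos h101]; omega
    rw [pvSmallComb_eq _ _ (PySem.Int.mod_nonneg _ h101) (PySem.Int.mod_nonneg _ h101)]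
    rw [hmn, hmk, hdn, hdk]
    rw [pv_lucas_step n.toNat kk.toNat]
    push_cast
    ring
  · rw [if_neg h0]
    have : kk = 0 := by omega
    subst this
    simp

theorem pvCombMod_cast (n kk : Int) (hn : 0 ≤ n) (hk : 0 ≤ kk) :
    ((pvCombMod n kk : Int) : ZMod 101) = (Nat.choose n.toNat kk.toNat : ZMod 101) := by
  unfold pvCombMod
  rw [pvCombModLoop_cast kk.toNat n 1 hn kk hk rfl]
  simp

-- the enumerate fold, cast to ZMod 101, is the weighted finite sum
theorem pv_fold_cast (m : Int) (hm : 0 ≤ m) :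
    ∀ (s : List Int) (j : Nat) (r : Int),
    (((PySem.List.enumerate s (j : Int)).foldl (fun t p => t + pvCombMod m p.1 * p.2) r : Int) : ZMod 101)
      = (r : ZMod 101) + ∑ k ∈ Finset.range s.length,
          (Nat.choose m.toNat (j + k) : ZMod 101) * ((s.getD k 0 : Int) : ZMod 101) := by
  intro s
  induction s with
  | nil => intro j r; simp [PySem.List.enumerate_nil]
  | cons x xs ihs =>
    intro j r
    rw [PySem.List.enumerate_cons]
    simp only [List.foldl]
    have hj1 : ((j : Int) + 1) = ((j + 1 : Nat) : Int) := by push_cast; ring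
    rw [hj1, ihs (j + 1) (r + pvCombMod m (j : Int) * x)]
    simp only [List.length_cons]
    rw [Finset.sum_range_succ' (fun k => (Nat.choose m.toNat (j + k) : ZMod 101) * (((x :: xs).getD k 0 : Int) : ZMod 101))]
    simp only [List.getD_cons_zero, List.getD_cons_succ, Nat.add_zero]
    push_cast
    rw [pvCombMod_cast m (j : Int) hm (by omega)]
    have hjt : ((j : Int)).toNat = j := by omega
    rw [hjt]
    have hidx : ∀ k : Nat, (j + 1) + k = j + (k + 1) := by omega
    simp only [hidx]
    ring

-- B also computes the canonical representative, for lists of length ≥ 2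
theorem pvB_correct (s : List Int) (h : 2 ≤ s.length) :
    to_chemistry_index_alt s = ((pvW s).val : Int) := by
  unfold to_chemistry_index_alt
  simp only []
  rw [if_neg (by omega : ¬ ((s.length : Int) = 1))]
  refine pv_val_eq (PySem.Int.mod_nonneg _ (by omega)) (PySem.Int.mod_lt _ (by omega)) ?_
  rw [pv_cast_mod]
  have h0 : ((0 : Nat) : Int) = 0 := rfl
  rw [← h0, pv_fold_cast ((s.length : Int) - 1) (by omega) s 0 (((0 : Nat) : Int))]
  have hm : ((s.length : Int) - 1).toNat = s.length - 1 := by omega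
  unfold pvW
  rw [hm]
  simp

-- ===== VERDICT (by name: the statement is the Claim_ definition above) =====
theorem to_chemistry_index_spec : Claim_equal_to_chemistry_index := by
  intro source _ hpre
  unfold Spec_to_chemistry_index
  by_cases h2 : 2 ≤ source.length
  · rw [pvA_correct source h2, pvB_correct source h2]
  · -- singleton: both return source[0]
    have h1 : source.length = 1 := by
      cases source with
      | nil => exact absurd rfl hpre
      | cons x xs => simp at h2 ⊢; omega
    rw [to_chemistry_index, if_neg (by omega)]
    unfold to_chemistry_index_alt
    simp only []
    rw [if_pos (by exact_mod_cast congrArg (Nat.cast : Nat → Int) h1)]
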